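-- pv_equiv track=rewrite | github.com/arkutils/Purlovia | processing/stage_region_maps.py | _group_levels_by_directory
-- ===== SOURCE A (Python) =====
-- from typing import Any, Dict, Iterable, List, Optional, Set, Union
--
-- def _group_levels_by_directory(assetnames: Iterable[str]) -> Dict[str, List[str]]:
--     # HACK: Copied straight from stage_maps.
--     '''
--     Takes an unsorted list of levels and groups them by directory.
--     '''
--     levels: Dict[str, Set[str]] = dict()
--
--     for assetname in assetnames:
--         path = assetname[:assetname.rfind('/')]
--         if path not in levels:
--             levels[path] = set()
--         levels[path].add(assetname)
--
--     return {path: list(sorted(names)) for path, names in levels.items()}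
-- ===== SOURCE B (Python) =====
-- def _group_levels_by_directory(assetnames):
--     '''
--     Takes an unsorted list of levels and groups them by directory.
--     '''
--     names = list(assetnames)
--     # key order = first occurrence of each directory, as dicts preserve insertion order
--     result = {n[:n.rfind('/')]: [] for n in names}
--     # one global sort by (directory, name) makes each group contiguous and internally
--     # ordered; equal names become adjacent, so a one-element memory deduplicates
--     prev = None
--     for n in sorted(names, key=lambda x: (x[:x.rfind('/')], x)):
--         if n != prev:
--             result[n[:n.rfind('/')]].append(n)
--             prev = n
--     return result
-- ===== Notes on version B (the rewrite author's own statement) =====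
-- stated objective: alternative
-- what changed: Replaced A's per-directory dict of sets (each bucket sorted separately at the end) by one global sort of all names keyed by (directory, name) followed by a single linear scan that deduplicates adjacent equal names and distributes each kept name into its directory's list.
import Mathlib
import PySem

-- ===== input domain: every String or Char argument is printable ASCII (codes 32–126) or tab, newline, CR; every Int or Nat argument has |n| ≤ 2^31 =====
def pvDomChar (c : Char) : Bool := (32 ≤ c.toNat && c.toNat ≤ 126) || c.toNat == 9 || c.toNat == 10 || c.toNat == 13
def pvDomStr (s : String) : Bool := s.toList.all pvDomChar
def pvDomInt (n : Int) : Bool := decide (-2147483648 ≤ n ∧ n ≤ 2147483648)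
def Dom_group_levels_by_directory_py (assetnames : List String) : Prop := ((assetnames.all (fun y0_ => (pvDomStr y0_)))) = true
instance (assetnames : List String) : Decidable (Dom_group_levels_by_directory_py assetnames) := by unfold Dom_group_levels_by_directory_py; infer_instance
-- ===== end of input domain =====

-- B replaces A's per-directory hash buckets of sets (each sorted at the end) by one global
-- sort keyed by (directory, name) followed by a single deduplicating scan (objective: alternative).

-- shared helper: both Pythons compute assetname[:assetname.rfind('/')]
def pvPathOf (s : String) : String := PySem.Str.slice s none (some (PySem.Str.rfind s "/"))

-- ===== PORT A =====
def group_levels_by_directory_py (assetnames : List String) : List (String × List String) :=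
  let levels : PySem.Dict String (PySem.Set String) :=
    assetnames.foldl (fun d n =>
      let path := pvPathOf n
      let d' := if d.contains path then d else d.insert path PySem.Set.empty
      d'.modify path PySem.Set.empty (fun s => PySem.Set.add s n)) PySem.Dict.empty
  (levels.items.foldl
    (fun d pr => d.insert pr.1 (PySem.List.sorted pr.2 (fun x => x)))
    PySem.Dict.empty).items

-- ===== PORT B =====
-- the loop body: 'if n != prev: result[path(n)].append(n); prev = n'
def pvStepB (st : PySem.Dict String (List String) × Option String) (n : String) :
    PySem.Dict String (List String) × Option String :=
  if some n ≠ st.2 then (st.1.modify (pvPathOf n) [] (fun l => l ++ [n]), some n) else st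

def group_levels_by_directory_py_alt (assetnames : List String) : List (String × List String) :=
  let names := assetnames
  let result : PySem.Dict String (List String) :=
    names.foldl (fun d n => d.insert (pvPathOf n) []) PySem.Dict.empty
  let st := (PySem.List.sorted2 names pvPathOf (fun x => x)).foldl pvStepB (result, none)
  st.1.items

-- ===== PRECONDITION & SPEC =====
def Spec_group_levels_by_directory_py (assetnames : List String) (out : List (String × List String)) : Prop := out = group_levels_by_directory_py_alt assetnames
instance (assetnames : List String) (out : List (String × List String)) : Decidable (Spec_group_levels_by_directory_py assetnames out) := by unfold Spec_group_levels_by_directory_py; infer_instance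

-- ===== CLAIM (what is proved, stated in full; the proofs are below) =====
def Claim_equal_group_levels_by_directory_py : Prop := ∀ (assetnames : List String), Dom_group_levels_by_directory_py assetnames → Spec_group_levels_by_directory_py assetnames (group_levels_by_directory_py assetnames)

-- ===== LEMMAS AND PROOFS =====

-- the weak (lexicographic ≤ on (path, name)) and strict orders the sort establishes
def pvLexle (a b : String) : Prop := pvPathOf a < pvPathOf b ∨ (pvPathOf a = pvPathOf b ∧ a ≤ b)
def pvLexlt (a b : String) : Prop := pvPathOf a < pvPathOf b ∨ (pvPathOf a = pvPathOf b ∧ a < b)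

theorem pvLexle_trans : ∀ (a b c : String), pvLexle a b → pvLexle b c → pvLexle a c := by
  intro a b c
  rintro (h1 | ⟨e1, h1⟩) (h2 | ⟨e2, h2⟩)
  · exact Or.inl (lt_trans h1 h2)
  · exact Or.inl (e2 ▸ h1)
  · exact Or.inl (e1 ▸ h2)
  · exact Or.inr ⟨e1.trans e2, le_trans h1 h2⟩

theorem pvLexlt_trans : ∀ (a b c : String), pvLexlt a b → pvLexlt b c → pvLexlt a c := by
  intro a b c
  rintro (h1 | ⟨e1, h1⟩) (h2 | ⟨e2, h2⟩)
  · exact Or.inl (lt_trans h1 h2)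
  · exact Or.inl (e2 ▸ h1)
  · exact Or.inl (e1 ▸ h2)
  · exact Or.inr ⟨e1.trans e2, lt_trans h1 h2⟩

theorem pvLexlt_of_lexle_ne {a b : String} (h : pvLexle a b) (hne : a ≠ b) : pvLexlt a b := by
  rcases h with h | ⟨e, h⟩
  · exact Or.inl h
  · exact Or.inr ⟨e, lt_of_le_of_ne h hne⟩

-- pairwise order of a foldl of insertBy, for any 'before' total w.r.t. R
theorem pv_insertBy_pairwise {R : String → String → Prop} (htrans : ∀ a b c, R a b → R b c → R a c)
    {before : String → String → Bool}
    (h1 : ∀ a b, before a b = true → R a b) (h2 : ∀ a b, before a b = false → R b a)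
    (x : String) : ∀ ys : List String, ys.Pairwise R →
      (PySem.List.insertBy before x ys).Pairwise R := by
  intro ys
  induction ys with
  | nil => intro _; simp [PySem.List.insertBy]
  | cons y t ih =>
    intro hp
    rw [show PySem.List.insertBy before x (y :: t)
        = if before x y then x :: y :: t else y :: PySem.List.insertBy before x t from rfl]
    rcases List.pairwise_cons.mp hp with ⟨hy, ht⟩
    by_cases h : before x y = true
    · simp only [h, if_true]
      exact List.pairwise_cons.mpr ⟨by
        intro z hz
        rcases List.mem_cons.mp hz with rfl | hz
        · exact h1 _ _ h
        · exact htrans _ _ _ (h1 _ _ h) (hy z hz), hp⟩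
    · simp only [h]
      refine List.pairwise_cons.mpr ⟨?_, ih ht⟩
      intro z hz
      rcases (PySem.List.mem_insertBy before x z t).mp hz with rfl | hz
      · exact h2 _ _ (by simpa using h)
      · exact hy z hz

theorem pv_foldl_insertBy_pairwise {R : String → String → Prop} (htrans : ∀ a b c, R a b → R b c → R a c)
    {before : String → String → Bool}
    (h1 : ∀ a b, before a b = true → R a b) (h2 : ∀ a b, before a b = false → R b a) :
    ∀ (xs acc : List String), acc.Pairwise R →
      (xs.foldl (fun acc x => PySem.List.insertBy before x acc) acc).Pairwise R := by
  intro xs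
  induction xs with
  | nil => intro acc h; simpa using h
  | cons x t ih => intro acc h; exact ih _ (pv_insertBy_pairwise htrans h1 h2 x acc h)

theorem pv_sorted2_pairwise (xs : List String) :
    (PySem.List.sorted2 xs pvPathOf (fun x => x)).Pairwise pvLexle := by
  have hdef : PySem.List.sorted2 xs pvPathOf (fun x => x)
      = xs.foldl (fun acc x => PySem.List.insertBy
          (fun a b => decide (pvPathOf a < pvPathOf b)
            || (!decide (pvPathOf b < pvPathOf a) && decide (a < b))) x acc) [] := rfl
  rw [hdef]
  refine pv_foldl_insertBy_pairwise pvLexle_trans ?_ ?_ xs [] List.Pairwise.nil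
  · intro a b h
    simp only [Bool.or_eq_true, Bool.and_eq_true, Bool.not_eq_true', decide_eq_true_eq,
      decide_eq_false_iff_not] at h
    rcases h with h | ⟨h1, h2⟩
    · exact Or.inl h
    · rcases lt_or_eq_of_le (not_lt.mp h1) with h' | h'
      · exact Or.inl h'
      · exact Or.inr ⟨h', le_of_lt h2⟩
  · intro a b h
    simp only [Bool.or_eq_false_iff, Bool.and_eq_false_iff, Bool.not_eq_false',
      decide_eq_true_eq, decide_eq_false_iff_not] at h
    rcases h with ⟨h1, h2 | h2⟩
    · exact Or.inl h2
    · rcases lt_or_eq_of_le (not_lt.mp h1) with h' | h'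
      · exact Or.inl h'
      · exact Or.inr ⟨h', not_lt.mp h2⟩

-- the deduplicating scan's 'kept' elements
def pvKeep : Option String → List String → List String
  | _, [] => []
  | prev, n :: t => if some n = prev then pvKeep prev t else n :: pvKeep (some n) t

theorem pvKeep_subset {x : String} : ∀ (prev : Option String) (l : List String), x ∈ pvKeep prev l → x ∈ l := by
  intro prev l
  induction l generalizing prev with
  | nil => simp [pvKeep]
  | cons n t ih =>
    intro h
    rw [pvKeep] at h
    by_cases hc : some n = prev
    · rw [if_pos hc] at h
      exact List.mem_cons_of_mem _ (ih prev h)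
    · rw [if_neg hc] at h
      rcases List.mem_cons.mp h with rfl | h
      · exact List.mem_cons_self
      · exact List.mem_cons_of_mem _ (ih _ h)

theorem mem_pvKeep {x : String} : ∀ (l : List String) (a : String), x ∈ l → x = a ∨ x ∈ pvKeep (some a) l := by
  intro l
  induction l with
  | nil => simp
  | cons n t ih =>
    intro a hx
    rw [pvKeep]
    by_cases hc : (some n : Option String) = some a
    · rw [if_pos hc]
      have hna : n = a := by simpa using hc
      rcases List.mem_cons.mp hx with rfl | hx
      · exact Or.inl hna
      · exact ih a hx
    · rw [if_neg hc]
      rcases List.mem_cons.mp hx with rfl | hx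
      · exact Or.inr List.mem_cons_self
      · rcases ih n hx with rfl | h
        · exact Or.inr List.mem_cons_self
        · exact Or.inr (List.mem_cons_of_mem _ h)

theorem pvKeep_chain : ∀ (l : List String) (a : String), l.Pairwise pvLexle → (∀ y ∈ l, pvLexle a y) →
    (pvKeep (some a) l).Pairwise pvLexlt ∧ (∀ y ∈ pvKeep (some a) l, pvLexlt a y) := by
  intro l
  induction l with
  | nil => intro a _ _; simp [pvKeep]
  | cons n t ih =>
    intro a hp ha
    rcases List.pairwise_cons.mp hp with ⟨hn, ht⟩
    rw [pvKeep]
    by_cases hc : (some n : Option String) = some a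
    · rw [if_pos hc]
      have hna : n = a := by simpa using hc
      subst hna
      exact ih n ht hn
    · rw [if_neg hc]
      have hna : a ≠ n := fun h => hc (by rw [h])
      have halt : pvLexlt a n := pvLexlt_of_lexle_ne (ha n List.mem_cons_self) hna
      rcases ih n ht hn with ⟨P, H⟩
      refine ⟨List.pairwise_cons.mpr ⟨H, P⟩, ?_⟩
      intro y hy
      rcases List.mem_cons.mp hy with rfl | hy
      · exact halt
      · exact pvLexlt_trans _ _ _ halt (H y hy)

theorem pvKeep_none_pairwise (l : List String) (h : l.Pairwise pvLexle) :
    (pvKeep none l).Pairwise pvLexlt := by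
  cases l with
  | nil => simp [pvKeep]
  | cons n t =>
    rcases List.pairwise_cons.mp h with ⟨hn, ht⟩
    rw [pvKeep, if_neg (by simp)]
    rcases pvKeep_chain t n ht hn with ⟨P, H⟩
    exact List.pairwise_cons.mpr ⟨H, P⟩

theorem mem_pvKeep_none {x : String} (l : List String) : x ∈ pvKeep none l ↔ x ∈ l := by
  cases l with
  | nil => simp [pvKeep]
  | cons n t =>
    rw [pvKeep, if_neg (by simp)]
    constructor
    · intro h
      rcases List.mem_cons.mp h with rfl | h
      · exact List.mem_cons_self
      · exact List.mem_cons_of_mem _ (pvKeep_subset _ _ h)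
    · intro h
      rcases List.mem_cons.mp h with rfl | h
      · exact List.mem_cons_self
      · rcases mem_pvKeep t n h with rfl | h
        · exact List.mem_cons_self
        · exact List.mem_cons_of_mem _ h

-- ===== A-side characterisation =====

theorem pvA_getD (p : String) : ∀ (l : List String) (d : PySem.Dict String (PySem.Set String)),
    (l.foldl (fun d n =>
      let path := pvPathOf n
      let d' := if d.contains path then d else d.insert path PySem.Set.empty
      d'.modify path PySem.Set.empty (fun s => PySem.Set.add s n)) d).getD p [] =
    PySem.Set.update (d.getD p []) (l.filter (fun n => pvPathOf n == p)) := by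
  intro l
  induction l with
  | nil => intro d; simp [PySem.Set.update_nil]
  | cons n t ih =>
    intro d
    simp only [List.foldl_cons, List.filter_cons]
    rw [ih]
    by_cases hcp : pvPathOf n = p
    · have hkey : ((if d.contains (pvPathOf n) = true then d
          else d.insert (pvPathOf n) PySem.Set.empty).modify (pvPathOf n) PySem.Set.empty
          (fun s => PySem.Set.add s n)).getD p []
          = PySem.Set.add (d.getD p []) n := by
        subst hcp
        simp only [PySem.Set.empty_eq]
        by_cases hc : d.contains (pvPathOf n) = true
        · rw [if_pos hc]
          exact PySem.Dict.getD_modify_self d (pvPathOf n) [] (fun s => PySem.Set.add s n)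
        · rw [if_neg hc]
          have hc' : d.contains (pvPathOf n) = false := by simpa using hc
          have h0 : d.getD (pvPathOf n) ([] : PySem.Set String) = [] :=
            PySem.Dict.getD_of_not_contains d _ hc'
          have h2 := PySem.Dict.getD_modify_self (d.insert (pvPathOf n) [])
            (pvPathOf n) [] (fun s => PySem.Set.add s n)
          rw [h2, PySem.Dict.getD_insert_self, h0]
      rw [hkey, if_pos (by simpa using hcp), PySem.Set.update_cons]
    · have hkey : ((if d.contains (pvPathOf n) = true then d
          else d.insert (pvPathOf n) PySem.Set.empty).modify (pvPathOf n) PySem.Set.empty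
          (fun s => PySem.Set.add s n)).getD p []
          = d.getD p [] := by
        simp only [PySem.Set.empty_eq]
        by_cases hc : d.contains (pvPathOf n) = true
        · rw [if_pos hc]
          exact PySem.Dict.getD_modify_of_ne d _ _ (Ne.symm hcp)
        · rw [if_neg hc]
          rw [PySem.Dict.getD_modify_of_ne _ _ _ (Ne.symm hcp),
            PySem.Dict.getD_insert_of_ne _ _ _ (Ne.symm hcp)]
      rw [hkey, if_neg (by simpa using hcp)]

theorem pvA_keys : ∀ (l : List String) (d : PySem.Dict String (PySem.Set String)),
    (l.foldl (fun d n =>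
      let path := pvPathOf n
      let d' := if d.contains path then d else d.insert path PySem.Set.empty
      d'.modify path PySem.Set.empty (fun s => PySem.Set.add s n)) d).keys =
    PySem.Set.update d.keys (l.map pvPathOf) := by
  intro l
  induction l with
  | nil => intro d; simp [PySem.Set.update_nil]
  | cons n t ih =>
    intro d
    simp only [List.foldl_cons, List.map_cons]
    rw [ih, PySem.Set.update_cons]
    congr 1
    by_cases hc : d.contains (pvPathOf n) = true
    · rw [if_pos hc, PySem.Dict.keys_modify, PySem.Dict.keys_insert_of_contains _ _ hc,
        PySem.Set.add_of_mem ((PySem.Dict.contains_iff_mem_keys d _).mp hc)]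
    · have hc' : d.contains (pvPathOf n) = false := by simpa using hc
      rw [if_neg hc, PySem.Dict.keys_modify,
        PySem.Dict.keys_insert_of_contains _ _ (PySem.Dict.contains_insert_self d _ _),
        PySem.Dict.keys_insert_of_not_contains _ _ hc',
        PySem.Set.add_of_not_mem (fun hm => by
          rw [(PySem.Dict.contains_iff_mem_keys d _).mpr hm] at hc'
          exact absurd hc' (by simp))]

-- ===== B-side characterisation =====

theorem pvB_init_getD (p : String) : ∀ (l : List String) (d : PySem.Dict String (List String)),
    d.getD p [] = [] →
    (l.foldl (fun d n => d.insert (pvPathOf n) []) d).getD p [] = [] := by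
  intro l
  induction l with
  | nil => intro d h; simpa using h
  | cons n t ih =>
    intro d h
    simp only [List.foldl_cons]
    refine ih _ ?_
    by_cases hcp : p = pvPathOf n
    · subst hcp; rw [PySem.Dict.getD_insert_self]
    · rw [PySem.Dict.getD_insert_of_ne _ _ _ hcp]; exact h

theorem pvB_scan (p : String) : ∀ (l : List String) (st : PySem.Dict String (List String) × Option String),
    (∀ n ∈ l, st.1.contains (pvPathOf n) = true) →
    (l.foldl pvStepB st).1.getD p [] = st.1.getD p [] ++ (pvKeep st.2 l).filter (fun n => pvPathOf n == p) ∧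
    (l.foldl pvStepB st).1.keys = st.1.keys := by
  intro l
  induction l with
  | nil => intro st _; simp [pvKeep]
  | cons n t ih =>
    intro st hcont
    simp only [List.foldl_cons]
    by_cases hc : some n = st.2
    · have hstep : pvStepB st n = st := by
        rw [pvStepB, if_neg (by simpa using hc)]
      rw [hstep, pvKeep, if_pos hc]
      exact ih st (fun m hm => hcont m (List.mem_cons_of_mem _ hm))
    · have hstep : pvStepB st n
          = (st.1.modify (pvPathOf n) [] (fun l => l ++ [n]), some n) := by
        rw [pvStepB, if_pos hc]
      rw [hstep, pvKeep, if_neg hc]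
      have hcn : st.1.contains (pvPathOf n) = true := hcont n List.mem_cons_self
      have hcont' : ∀ m ∈ t,
          (st.1.modify (pvPathOf n) [] (fun l => l ++ [n])).contains (pvPathOf m) = true := by
        intro m hm
        rw [PySem.Dict.contains_modify]
        rw [hcont m (List.mem_cons_of_mem _ hm)]
        simp
      rcases ih (st.1.modify (pvPathOf n) [] (fun l => l ++ [n]), some n) hcont' with ⟨h1, h2⟩
      constructor
      · rw [h1, List.filter_cons]
        by_cases hcp : pvPathOf n = p
        · subst hcp
          rw [PySem.Dict.getD_modify_self, if_pos (by simp)]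
          simp
        · rw [PySem.Dict.getD_modify_of_ne _ _ _ (fun h => hcp h.symm),
            if_neg (by simpa using hcp)]
      · rw [h2, PySem.Dict.keys_modify, PySem.Dict.keys_insert_of_contains _ _ hcn]

-- ===== the per-directory value equality =====

theorem pv_value_eq (names : List String) (p : String) :
    PySem.List.sorted (PySem.Set.ofList (names.filter (fun n => pvPathOf n == p))) (fun x => x) =
    (pvKeep none (PySem.List.sorted2 names pvPathOf (fun x => x))).filter (fun n => pvPathOf n == p) := by
  have hperm := PySem.List.sorted2_perm names pvPathOf (fun x => x) false
  have hpw := pv_sorted2_pairwise names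
  have hkeepPw := pvKeep_none_pairwise _ hpw
  have hpwLt : ((pvKeep none (PySem.List.sorted2 names pvPathOf (fun x => x))).filter
      (fun n => pvPathOf n == p)).Pairwise (fun a b : String => a < b) := by
    refine List.Pairwise.imp_of_mem ?_ (hkeepPw.filter _)
    intro a b ha hb hab
    have hpa : pvPathOf a = p := by simpa using (List.mem_filter.mp ha).2
    have hpb : pvPathOf b = p := by simpa using (List.mem_filter.mp hb).2
    rcases hab with h | ⟨_, h⟩
    · rw [hpa, hpb] at h; exact absurd h (lt_irrefl p)
    · exact h
  have hnodup : ((pvKeep none (PySem.List.sorted2 names pvPathOf (fun x => x))).filter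
      (fun n => pvPathOf n == p)).Nodup := hpwLt.imp (fun {a b} h => ne_of_lt h)
  refine PySem.List.sorted_eq_of_perm_of_pairwise_lt _ _ _ ?_ hpwLt
  refine (List.perm_ext_iff_of_nodup hnodup (PySem.Set.nodup_ofList _)).mpr ?_
  intro x
  simp only [List.mem_filter, PySem.Set.mem_ofList, mem_pvKeep_none, hperm.mem_iff]

-- ===== VERDICT (by name: the statement is the Claim_ definition above) =====
theorem group_levels_by_directory_py_spec : Claim_equal_group_levels_by_directory_py := by
  intro names _
  unfold Spec_group_levels_by_directory_py
  simp only [group_levels_by_directory_py, group_levels_by_directory_py_alt]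
  set L : PySem.Dict String (PySem.Set String) := names.foldl (fun d n =>
      let path := pvPathOf n
      let d' := if d.contains path then d else d.insert path PySem.Set.empty
      d'.modify path PySem.Set.empty (fun s => PySem.Set.add s n)) PySem.Dict.empty with hLdef
  set D0 : PySem.Dict String (List String) :=
    names.foldl (fun d n => d.insert (pvPathOf n) []) PySem.Dict.empty with hD0def
  set S : List String := PySem.List.sorted2 names pvPathOf (fun x => x) with hSdef
  set F : PySem.Dict String (List String) := (S.foldl pvStepB (D0, none)).1 with hFdef
  -- A-side facts
  have hAkeys : L.keys = PySem.Set.update [] (names.map pvPathOf) := by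
    rw [hLdef]
    simpa [PySem.Dict.keys_empty] using pvA_keys names PySem.Dict.empty
  have hAnodup : L.keys.Nodup := by
    rw [hAkeys]; exact PySem.Set.nodup_update _ _ (by simp)
  have hAgetD : ∀ q, L.getD q [] = PySem.Set.ofList (names.filter (fun n => pvPathOf n == q)) := by
    intro q
    rw [hLdef]
    have h := pvA_getD q names PySem.Dict.empty
    rw [PySem.Dict.getD_empty] at h
    rw [h, PySem.Set.update_nil_left]
  -- B-side facts
  have hBkeys : D0.keys = PySem.Set.update [] (names.map pvPathOf) := by
    rw [hD0def]
    simpa [PySem.Dict.keys_empty] using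
      PySem.Dict.keys_foldl_insert_key names pvPathOf (fun _ _ => ([] : List String)) PySem.Dict.empty
  have hBnodup : D0.keys.Nodup := by
    rw [hD0def]
    exact PySem.Dict.nodup_keys_foldl_insert_key names pvPathOf _ _ PySem.Dict.nodup_keys_empty
  have hperm := PySem.List.sorted2_perm names pvPathOf (fun x => x) false
  have hcont : ∀ n ∈ S, D0.contains (pvPathOf n) = true := by
    intro n hn
    rw [PySem.Dict.contains_iff_mem_keys, hBkeys, PySem.Set.mem_update]
    exact Or.inr (List.mem_map_of_mem (hperm.mem_iff.mp (hSdef ▸ hn)))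
  have hFkeys : F.keys = D0.keys := (pvB_scan "" S (D0, none) hcont).2
  have hFnodup : F.keys.Nodup := hFkeys ▸ hBnodup
  have hFgetD : ∀ q, F.getD q [] = (pvKeep none S).filter (fun n => pvPathOf n == q) := by
    intro q
    rw [hFdef, (pvB_scan q S (D0, none) hcont).1]
    have h0 : D0.getD q [] = [] := by
      rw [hD0def]
      exact pvB_init_getD q names PySem.Dict.empty (PySem.Dict.getD_empty _ _)
    rw [h0, List.nil_append]
  -- rewrite A's outer dict comprehension into a map
  have hmapnodup : (L.items.map (fun pr => pr.1)).Nodup := hAnodup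
  have hAitems := PySem.Dict.items_foldl_insert_fresh L.items (fun pr => pr.1)
    (fun pr => PySem.List.sorted pr.2 (fun x => x)) PySem.Dict.empty
    (fun a _ => PySem.Dict.contains_empty _) hmapnodup
  rw [hAitems]
  rw [PySem.Dict.items_eq_map_keys L hAnodup [], PySem.Dict.items_eq_map_keys F hFnodup [],
    List.map_map]
  rw [hFkeys, hBkeys, hAkeys]
  have : (PySem.Dict.empty : PySem.Dict String (List String)).items = [] := rfl
  rw [this, List.nil_append]
  refine List.map_congr_left ?_
  intro k _
  simp only [Function.comp]
  refine Prod.ext rfl ?_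
  show PySem.List.sorted (L.getD k []) (fun x => x) = F.getD k []
  rw [hAgetD k, hFgetD k]
  exact pv_value_eq names k
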